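-- pv_equiv track=rewrite | github.com/nogibjj/repo_wafi | test.py | word_tag
-- ===== SOURCE A (Python) =====
-- trainlist = []
--
-- def word_tag(w1, w2, corpus=trainlist):
--     dictword = []
--     dictall = []
--     for i in corpus:
--         if i[0] == w1:
--             dictall.append(i)
--             pass
--         else:
--             pass
--         pass
--     if len(dictall) == 0:
--         dictall.append(1)
--         dictword.append(1)
--         pass
--     else:
--         for j in dictall:
--             if j[1] == w2:
--                 dictword.append(j)
--                 pass
--             else:
--                 pass
--             pass
--     return (len(dictword), len(dictall))
-- ===== SOURCE B (Python) =====
-- def word_tag(w1, w2, corpus=[]):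
--     word = 0
--     all_count = 0
--     for i in corpus:
--         if i[0] == w1:
--             all_count += 1
--             if i[1] == w2:
--                 word += 1
--     if all_count == 0:
--         return (1, 1)
--     return (word, all_count)
-- ===== Notes on version B (the rewrite author's own statement) =====
-- stated objective: simpler
-- what changed: Single pass with two integer counters replaces building the intermediate lists dictall and dictword in two phases and taking their lengths.
import Mathlib
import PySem

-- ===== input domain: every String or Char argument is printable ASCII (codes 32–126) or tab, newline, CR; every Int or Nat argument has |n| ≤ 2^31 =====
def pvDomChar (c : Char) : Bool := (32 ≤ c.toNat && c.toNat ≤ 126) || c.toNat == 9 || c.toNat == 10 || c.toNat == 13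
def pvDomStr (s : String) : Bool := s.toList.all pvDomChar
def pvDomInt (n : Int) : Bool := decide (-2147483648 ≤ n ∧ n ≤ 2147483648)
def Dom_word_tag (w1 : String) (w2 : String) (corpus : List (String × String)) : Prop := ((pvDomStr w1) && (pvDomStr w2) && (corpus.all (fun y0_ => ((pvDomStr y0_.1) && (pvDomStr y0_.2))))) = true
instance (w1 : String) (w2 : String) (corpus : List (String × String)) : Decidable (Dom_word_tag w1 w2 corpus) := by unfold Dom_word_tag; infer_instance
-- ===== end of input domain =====

-- B fuses A's two list-building passes into one pass with two integer counters (objective: simpler).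

-- ===== PORT A =====
def word_tag (w1 : String) (w2 : String) (corpus : List (String × String)) : Int × Int :=
  -- dictall: first loop collects the entries whose first component equals w1
  let dictall : List (String × String) :=
    corpus.foldl (fun acc i => if i.1 == w1 then acc ++ [i] else acc) []
  if dictall.length == 0 then
    -- dictall.append(1); dictword.append(1): both lists get length 1
    ((1 : Int), (1 : Int))
  else
    -- second loop collects from dictall the entries whose second component equals w2
    let dictword : List (String × String) :=
      dictall.foldl (fun acc j => if j.2 == w2 then acc ++ [j] else acc) []
    ((dictword.length : Int), (dictall.length : Int))

-- ===== PORT B =====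
def word_tag_alt (w1 : String) (w2 : String) (corpus : List (String × String)) : Int × Int :=
  let p : Int × Int :=
    corpus.foldl
      (fun p i =>
        if i.1 == w1 then
          if i.2 == w2 then (p.1 + 1, p.2 + 1) else (p.1, p.2 + 1)
        else p)
      (0, 0)
  if p.2 == 0 then (1, 1) else p

-- ===== PRECONDITION & SPEC =====
def Spec_word_tag (w1 : String) (w2 : String) (corpus : List (String × String)) (out : Int × Int) : Prop := out = word_tag_alt w1 w2 corpus
instance (w1 : String) (w2 : String) (corpus : List (String × String)) (out : Int × Int) : Decidable (Spec_word_tag w1 w2 corpus out) := by unfold Spec_word_tag; infer_instance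

-- ===== CLAIM (what is proved, stated in full; the proofs are below) =====
def Claim_equal_word_tag : Prop := ∀ (w1 : String) (w2 : String) (corpus : List (String × String)), Dom_word_tag w1 w2 corpus → Spec_word_tag w1 w2 corpus (word_tag w1 w2 corpus)

-- ===== LEMMAS AND PROOFS =====

theorem pv_foldl_append_filter {α : Type} (q : α → Bool) :
    ∀ (l : List α) (acc : List α),
      l.foldl (fun acc i => if q i then acc ++ [i] else acc) acc = acc ++ l.filter q := by
  intro l
  induction l with
  | nil => intro acc; simp
  | cons x xs ih =>
      intro acc
      by_cases h : q x
      · simp [List.foldl, h, ih]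
      · simp [List.foldl, h, ih]

theorem pv_foldl_counts (w1 w2 : String) :
    ∀ (l : List (String × String)) (a b : Int),
      l.foldl
        (fun p i =>
          if i.1 == w1 then
            if i.2 == w2 then (p.1 + 1, p.2 + 1) else (p.1, p.2 + 1)
          else p)
        (a, b)
      = (a + ((l.filter (fun i => i.1 == w1 && i.2 == w2)).length : Int),
         b + ((l.filter (fun i => i.1 == w1)).length : Int)) := by
  intro l
  induction l with
  | nil => intro a b; simp
  | cons x xs ih =>
      intro a b
      by_cases h1 : (x.1 == w1) = true
      · by_cases h2 : (x.2 == w2) = true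
        · simp only [List.foldl_cons, h1, h2, if_true]
          rw [ih]
          simp [List.filter_cons, h1, h2]
          constructor <;> push_cast <;> ring
        · simp only [List.foldl_cons, h1, h2, if_true, Bool.false_eq_true, if_false]
          rw [ih]
          simp [List.filter_cons, h1, h2]
          push_cast; ring
      · simp only [List.foldl_cons, h1, Bool.false_eq_true, if_false]
        rw [ih]
        simp [List.filter_cons, h1]

theorem word_tag_spec : Claim_equal_word_tag := by
  intro w1 w2 corpus _
  show word_tag w1 w2 corpus = word_tag_alt w1 w2 corpus
  unfold word_tag word_tag_alt
  simp only [pv_foldl_append_filter, pv_foldl_counts, List.nil_append, zero_add,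
    List.filter_filter]
  have hsw : corpus.filter (fun a : String × String => a.2 == w2 && a.1 == w1)
      = corpus.filter (fun i => i.1 == w1 && i.2 == w2) :=
    List.filter_congr (fun x _ => Bool.and_comm ..)
  rw [hsw]
  rcases h : (corpus.filter (fun i => i.1 == w1)).length with _ | n
  · simp [List.length_eq_zero_iff.mp h]
  · have hne : ((corpus.filter (fun i => i.1 == w1)).length : Int) ≠ 0 := by
      rw [h]; exact_mod_cast Nat.succ_ne_zero n
    rw [if_neg (by simp [h]), if_neg (by simpa using hne)]
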